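-- pv_equiv track=rewrite | github.com/DarthBanana/AdventOfCode | 2018/12/solution.py | get_plant_string
-- ===== SOURCE A (Python) =====
-- def get_plant_string(plants):
--     min_plant = min(plants)
--     max_plant = max(plants)
--     string=""
--     for i in range(min_plant, max_plant+1):
--         if i in plants:
--             string += "#"
--         else:
--             string += "."
--     return string.strip(".")
-- ===== SOURCE B (Python) =====
-- def get_plant_string(plants):
--     ps = sorted(set(plants))
--     parts = []
--     prev = None
--     for p in ps:
--         if prev is None:
--             parts.append("#")
--         else:
--             parts.append("." * (p - prev - 1) + "#")
--         prev = p
--     return "".join(parts)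
-- ===== Notes on version B (the rewrite author's own statement) =====
-- stated objective: faster
-- what changed: A scans every index of range(min,max+1) and runs an 'i in plants' list scan per index; B sorts the distinct plant positions once and emits each inter-plant gap of dots in one step, so no per-cell membership test and no final strip is needed.
import Mathlib
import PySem

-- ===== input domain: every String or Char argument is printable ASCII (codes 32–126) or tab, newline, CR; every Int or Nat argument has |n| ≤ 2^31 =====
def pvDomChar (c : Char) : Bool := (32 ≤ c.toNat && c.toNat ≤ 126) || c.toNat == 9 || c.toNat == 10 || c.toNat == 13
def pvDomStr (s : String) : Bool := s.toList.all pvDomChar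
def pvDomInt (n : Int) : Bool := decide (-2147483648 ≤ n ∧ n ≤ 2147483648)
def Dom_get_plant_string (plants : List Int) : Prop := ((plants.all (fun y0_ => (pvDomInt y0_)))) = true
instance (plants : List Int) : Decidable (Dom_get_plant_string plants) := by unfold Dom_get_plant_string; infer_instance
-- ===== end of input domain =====

-- B replaces A's per-cell scan of the whole index range (with an 'i in plants' list scan per cell)
-- by one pass over sorted(set(plants)) that emits each gap of dots at once.

-- ===== PORT A =====
def get_plant_string (plants : List Int) : String :=
  match PySem.List.min? plants (fun x => x), PySem.List.max? plants (fun x => x) with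
  | some min_plant, some max_plant =>
      -- string += "#" / "." over range(min_plant, max_plant+1), then .strip(".")
      let string := (PySem.List.pyRange min_plant (max_plant + 1) 1).foldl
        (fun s i => s ++ (if i ∈ plants then ['#'] else ['.'])) ([] : List Char)
      String.ofList (PySem.Chars.stripChars string ['.'])
  | _, _ => ""   -- unreachable: min() raises ValueError on an empty list (excluded by Pre_)

-- ===== PORT B =====
def get_plant_string_alt (plants : List Int) : String :=
  let ps := PySem.List.sorted (PySem.Set.ofList plants) (fun x => x)
  let r := ps.foldl
    (fun (acc : List (List Char) × Option Int) p =>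
      match acc.2 with
      | none => (acc.1 ++ [['#']], some p)
      | some prev => (acc.1 ++ [PySem.List.pyRepeat ['.'] (p - prev - 1) ++ ['#']], some p))
    (([] : List (List Char)), (none : Option Int))
  String.ofList (PySem.Chars.join [] r.1)

-- ===== PRECONDITION & SPEC =====
-- Pre_ excludes only the empty list, on which Python A raises ValueError (min() of an empty sequence).
def Pre_get_plant_string (plants : List Int) : Prop := plants ≠ []
instance (plants : List Int) : Decidable (Pre_get_plant_string plants) := by unfold Pre_get_plant_string; infer_instance
def pvWitness_get_plant_string : List Int := [3, 1, 1, 7]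

def Spec_get_plant_string (plants : List Int) (out : String) : Prop := out = get_plant_string_alt plants
instance (plants : List Int) (out : String) : Decidable (Spec_get_plant_string plants out) := by unfold Spec_get_plant_string; infer_instance

-- ===== CLAIM (what is proved, stated in full; the proofs are below) =====
def Claim_equal_get_plant_string : Prop := ∀ (plants : List Int), Dom_get_plant_string plants → Pre_get_plant_string plants → Spec_get_plant_string plants (get_plant_string plants)

-- ===== LEMMAS AND PROOFS =====

-- the characters B emits after the first '#', as a function of the previous plant and the remaining plants
def bChars (prev : Int) : List Int → List Char
  | [] => []
  | p :: rest => List.replicate (p - prev - 1).toNat '.' ++ '#' :: bChars p rest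

-- the list of parts B's loop appends once prev is set
def partsOf (prev : Int) : List Int → List (List Char)
  | [] => []
  | p :: rest => (PySem.List.pyRepeat ['.'] (p - prev - 1) ++ ['#']) :: partsOf p rest

lemma getD_last_cons (b : Int) (t : List Int) (x y : Int) :
    (b :: t).getLast?.getD x = (b :: t).getLast?.getD y := by
  rw [List.getLast?_eq_some_getLast (l := b :: t) (by simp)]
  rfl

lemma joinNil (xs : List (List Char)) : PySem.Chars.join [] xs = xs.flatten := by
  induction xs with
  | nil => rfl
  | cons a t ih =>
    cases t with
    | nil => simp [PySem.Chars.join, List.intercalate]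
    | cons b t' =>
      simp [PySem.Chars.join, List.intercalate] at ih ⊢
      simpa using ih

lemma flatten_partsOf (prev : Int) (l : List Int) :
    (partsOf prev l).flatten = bChars prev l := by
  induction l generalizing prev with
  | nil => rfl
  | cons p rest ih => simp [partsOf, bChars, PySem.List.pyRepeat_singleton, ih]

lemma foldB (l : List Int) (acc : List (List Char)) (prev : Int) :
    l.foldl
      (fun (acc : List (List Char) × Option Int) p =>
        match acc.2 with
        | none => (acc.1 ++ [['#']], some p)
        | some prev => (acc.1 ++ [PySem.List.pyRepeat ['.'] (p - prev - 1) ++ ['#']], some p))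
      (acc, some prev)
    = (acc ++ partsOf prev l, some (l.getLast?.getD prev)) := by
  induction l generalizing acc prev with
  | nil => simp [partsOf]
  | cons p rest ih =>
    simp only [List.foldl]
    rw [ih]
    cases rest with
    | nil => simp [partsOf]
    | cons b t =>
      simp [partsOf, List.getLast?_cons_cons]
      exact getD_last_cons b t p prev

lemma gap (plants : List Int) (l : List Int) (prev : Int)
    (hp : l.Pairwise (· < ·)) (hgt : ∀ q ∈ l, prev < q)
    (hmem : ∀ i : Int, prev < i → (i ∈ plants ↔ i ∈ l)) :
    (PySem.List.pyRange (prev + 1) (l.getLast?.getD prev + 1) 1).map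
      (fun i => if i ∈ plants then '#' else '.') = bChars prev l := by
  induction l generalizing prev with
  | nil => simp [bChars, PySem.List.pyRange_one_eq_nil (by omega : prev + 1 ≤ prev + 1)]
  | cons p rest ih =>
    have hprevp : prev < p := hgt p (by simp)
    have hrestgt : ∀ q ∈ rest, p < q := fun q hq => (List.pairwise_cons.mp hp).1 q hq
    have hlast : p ≤ (p :: rest).getLast?.getD prev := by
      cases rest with
      | nil => simp
      | cons b t =>
        rw [List.getLast?_cons_cons, List.getLast?_eq_some_getLast (l := b :: t) (by simp)]
        exact le_of_lt (hrestgt _ (List.getLast_mem _))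
    have hsplit : PySem.List.pyRange (prev + 1) ((p :: rest).getLast?.getD prev + 1) 1
        = PySem.List.pyRange (prev + 1) p 1 ++ PySem.List.pyRange p ((p :: rest).getLast?.getD prev + 1) 1 :=
      PySem.List.pyRange_one_append _ _ _ (by omega) (by omega)
    have hcons : PySem.List.pyRange p ((p :: rest).getLast?.getD prev + 1) 1
        = p :: PySem.List.pyRange (p + 1) ((p :: rest).getLast?.getD prev + 1) 1 :=
      PySem.List.pyRange_one_cons (by omega)
    rw [hsplit, hcons, List.map_append, List.map_cons]
    have hdots : (PySem.List.pyRange (prev + 1) p 1).map (fun i => if i ∈ plants then '#' else '.')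
        = List.replicate (p - prev - 1).toNat '.' := by
      have hall : ∀ i ∈ PySem.List.pyRange (prev + 1) p 1, (if i ∈ plants then '#' else '.') = '.' := by
        intro i hi
        rw [PySem.List.mem_pyRange_one] at hi
        have : i ∉ plants := by
          rw [hmem i (by omega)]
          intro hmem2
          rcases List.mem_cons.mp hmem2 with h | h
          · omega
          · exact absurd (hrestgt i h) (by omega)
        simp [this]
      rw [List.map_congr_left hall]
      simp [List.map_const', PySem.List.length_pyRange_one]
      omega
    have hhash : (if p ∈ plants then '#' else '.') = '#' := by
      simp [(hmem p hprevp).mpr (by simp)]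
    have htail : (PySem.List.pyRange (p + 1) ((p :: rest).getLast?.getD prev + 1) 1).map
        (fun i => if i ∈ plants then '#' else '.') = bChars p rest := by
      have hl' : (p :: rest).getLast?.getD prev = rest.getLast?.getD p := by
        cases rest with
        | nil => simp
        | cons b t => rw [List.getLast?_cons_cons]; exact getD_last_cons b t prev p
      rw [hl']
      exact ih p (List.pairwise_cons.mp hp).2 hrestgt (by
        intro i hi
        rw [hmem i (by omega)]
        simp [List.mem_cons]
        omega)
    rw [hdots, hhash, htail]
    simp [bChars]

lemma lastB (prev : Int) (l : List Int) (h : l ≠ []) :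
    (bChars prev l).getLast? = some '#' := by
  induction l generalizing prev with
  | nil => exact absurd rfl h
  | cons p rest ih =>
    cases rest with
    | nil => simp [bChars]
    | cons b t =>
      have := ih (prev := p) (by simp)
      simp only [bChars] at this ⊢
      rw [List.getLast?_append, List.getLast?_cons, this]
      simp

lemma stripId (cs : List Char) (h1 : cs.head? = some '#') (h2 : cs.getLast? = some '#') :
    PySem.Chars.stripChars cs ['.'] = cs := by
  unfold PySem.Chars.stripChars
  show (List.dropWhile (fun c => ['.'].contains c)
      (List.dropWhile (fun c => ['.'].contains c) cs).reverse).reverse = cs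
  cases cs with
  | nil => simp at h1
  | cons c t =>
    simp at h1; subst h1
    rw [List.dropWhile_cons, if_neg (by decide)]
    have hrev : ('#' :: t).reverse.head? = some '#' := by
      rw [List.head?_reverse, h2]
    cases hr : ('#' :: t).reverse with
    | nil => simp [hr] at hrev
    | cons d r =>
      rw [hr] at hrev; simp at hrev; subst hrev
      rw [List.dropWhile_cons, if_neg (by decide)]
      rw [← hr, List.reverse_reverse]

lemma last_eq_max (l : List Int) (m : Int) (hp : l.Pairwise (· < ·)) (hm : m ∈ l)
    (hub : ∀ x ∈ l, x ≤ m) : l.getLast? = some m := by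
  induction l with
  | nil => simp at hm
  | cons a t ih =>
    cases t with
    | nil => simp at hm ⊢; simp [hm]
    | cons b u =>
      rw [List.getLast?_cons_cons]
      have hab : a < b := (List.pairwise_cons.mp hp).1 b (by simp)
      have hmem : m ∈ b :: u := by
        rcases List.mem_cons.mp hm with h | h
        · exact absurd (hub b (by simp)) (by omega)
        · exact h
      exact ih (List.pairwise_cons.mp hp).2 hmem (fun x hx => hub x (List.mem_cons_of_mem a hx))

-- ===== VERDICT (by name: the statement is the Claim_ definition above) =====
theorem get_plant_string_spec : Claim_equal_get_plant_string := by
  intro plants _ hne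
  unfold Spec_get_plant_string
  obtain ⟨mn, hmin⟩ : ∃ mn, PySem.List.min? plants (fun x => x) = some mn := by
    cases h : PySem.List.min? plants (fun x => x) with
    | none => exact absurd ((PySem.List.min?_eq_none_iff _ _).mp h) hne
    | some m => exact ⟨m, rfl⟩
  obtain ⟨mx, hmax⟩ : ∃ mx, PySem.List.max? plants (fun x => x) = some mx := by
    cases h : PySem.List.max? plants (fun x => x) with
    | none => exact absurd ((PySem.List.max?_eq_none_iff _ _).mp h) hne
    | some m => exact ⟨m, rfl⟩
  have hmnmem : mn ∈ plants := PySem.List.min?_mem hmin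
  have hmxmem : mx ∈ plants := PySem.List.max?_mem hmax
  have hmnmin : ∀ y ∈ plants, mn ≤ y := fun y hy => PySem.List.min?_isMin hmin y hy
  have hmxmax : ∀ y ∈ plants, y ≤ mx := fun y hy => PySem.List.max?_isMax hmax y hy
  have hperm := PySem.List.sorted_perm (PySem.Set.ofList plants) (fun x => x) false
  have hpsmem : ∀ x : Int, x ∈ PySem.List.sorted (PySem.Set.ofList plants) (fun x => x) ↔ x ∈ plants := by
    intro x
    rw [hperm.mem_iff, PySem.Set.mem_ofList]
  have hnodup : (PySem.List.sorted (PySem.Set.ofList plants) (fun x => x)).Nodup :=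
    (hperm.nodup_iff).mpr (PySem.Set.nodup_ofList plants)
  have hlt : (PySem.List.sorted (PySem.Set.ofList plants) (fun x => x)).Pairwise (· < ·) := by
    have hle := PySem.List.sorted_pairwise (PySem.Set.ofList plants) (fun x => x)
    exact (hle.and hnodup).imp (fun h => lt_of_le_of_ne h.1 h.2)
  cases hps : PySem.List.sorted (PySem.Set.ofList plants) (fun x => x) with
  | nil =>
    exact absurd ((hpsmem mn).mpr hmnmem) (by rw [hps]; simp)
  | cons p0 rest =>
    rw [hps] at hpsmem hnodup hlt
    -- head of the sorted distinct list is the minimum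
    have hp0 : p0 = mn := by
      have h1 : mn ≤ p0 := hmnmin p0 ((hpsmem p0).mp (by simp))
      have h2 : p0 ≤ mn := by
        rcases List.mem_cons.mp ((hpsmem mn).mpr hmnmem) with h | h
        · omega
        · exact le_of_lt ((List.pairwise_cons.mp hlt).1 mn h)
      omega
    subst hp0
    -- last of the sorted distinct list is the maximum
    have hlastps : (p0 :: rest).getLast? = some mx :=
      last_eq_max _ _ hlt ((hpsmem mx).mpr hmxmem) (fun x hx => hmxmax x ((hpsmem x).mp hx))
    have hmnmx : p0 ≤ mx := hmxmax p0 hmnmem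
    -- evaluate port A
    simp only [get_plant_string, hmin, hmax]
    rw [PySem.List.foldl_append_eq_flatMap]
    have hflat : ((PySem.List.pyRange p0 (mx + 1) 1).flatMap fun i => if i ∈ plants then ['#'] else ['.'])
        = (PySem.List.pyRange p0 (mx + 1) 1).map (fun i => if i ∈ plants then '#' else '.') := by
      have : (fun i : Int => if i ∈ plants then ['#'] else ['.'])
          = fun i => [if i ∈ plants then '#' else '.'] := by
        funext i; split_ifs <;> rfl
      rw [this]
      exact List.map_eq_flatMap.symm
    rw [hflat]
    have hrange : PySem.List.pyRange p0 (mx + 1) 1 = p0 :: PySem.List.pyRange (p0 + 1) (mx + 1) 1 :=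
      PySem.List.pyRange_one_cons (by omega)
    rw [hrange, List.map_cons]
    have hhead : (if p0 ∈ plants then '#' else '.') = '#' := by simp [hmnmem]
    have hrestlast : rest.getLast?.getD p0 = mx := by
      cases rest with
      | nil => simp at hlastps ⊢; omega
      | cons b t =>
        rw [List.getLast?_cons_cons] at hlastps
        rw [hlastps]
        rfl
    have htail : (PySem.List.pyRange (p0 + 1) (mx + 1) 1).map
        (fun i => if i ∈ plants then '#' else '.') = bChars p0 rest := by
      rw [← hrestlast]
      exact gap plants rest p0 (List.pairwise_cons.mp hlt).2
        (fun q hq => (List.pairwise_cons.mp hlt).1 q hq)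
        (by
          intro i hi
          rw [← hpsmem i]
          simp [List.mem_cons]
          omega)
    rw [hhead, htail]
    -- evaluate port B
    simp only [get_plant_string_alt, hps, List.foldl]
    rw [foldB, joinNil]
    simp only [List.nil_append]
    -- strip "." removes nothing: the string starts and ends with '#'
    rw [stripId]
    · simp [flatten_partsOf]
    · rfl
    · cases hrest : rest with
      | nil => simp [bChars]
      | cons b t =>
        have hb := lastB p0 (b :: t) (by simp)
        rw [List.getLast?_cons, hb]
        simp
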